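-- pv_equiv track=rewrite | github.com/justinabrahms/permachart | permachart/charter/utils.py | pretty_decode
-- ===== SOURCE A (Python) =====
-- ALPHABET="23456789bcdfghjkmnpqrstvwxyzBCDFGHJKLMNPQRSTUVWXYZ"
--
-- def pretty_decode(string, alphabet=ALPHABET):
--     """Decode a Base X encoded string into the number
--
--     Arguments:
--     - `string`: The encoded string
--     - `alphabet`: The alphabet to use for encoding
--     """
--     base = len(alphabet)
--     strlen = len(string)
--     num = 0
--
--     idx = 0
--     for char in string:
--         power = (strlen - (idx + 1))
--         num += alphabet.index(char) * (base ** power)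
--         idx += 1
--
--     return num
-- ===== SOURCE B (Python) =====
-- ALPHABET="23456789bcdfghjkmnpqrstvwxyzBCDFGHJKLMNPQRSTUVWXYZ"
--
-- def pretty_decode(string, alphabet=ALPHABET):
--     """Decode a Base X encoded string into the number (Horner's method,
--     with a char -> first-index table built once)."""
--     pos = {}
--     for i, char in enumerate(alphabet):
--         pos.setdefault(char, i)
--     base = len(alphabet)
--     num = 0
--     for char in string:
--         num = num * base + pos[char]
--     return num
-- ===== Notes on version B (the rewrite author's own statement) =====
-- stated objective: faster
-- what changed: Replaces the per-character alphabet.index scan and base**power exponentiation with Horner's method over a char->index dict built once.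
import Mathlib
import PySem

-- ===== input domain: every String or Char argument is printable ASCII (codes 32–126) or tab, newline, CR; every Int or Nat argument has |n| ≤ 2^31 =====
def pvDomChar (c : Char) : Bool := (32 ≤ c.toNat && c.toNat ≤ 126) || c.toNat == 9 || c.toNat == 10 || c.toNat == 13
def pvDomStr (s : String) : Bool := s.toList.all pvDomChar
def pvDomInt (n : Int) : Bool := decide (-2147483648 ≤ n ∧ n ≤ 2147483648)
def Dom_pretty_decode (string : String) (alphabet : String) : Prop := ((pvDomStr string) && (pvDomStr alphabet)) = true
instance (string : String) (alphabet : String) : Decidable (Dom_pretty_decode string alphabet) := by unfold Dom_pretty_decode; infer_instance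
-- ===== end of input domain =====

-- B replaces A's per-character alphabet.index scan and base**power with Horner's method
-- over a char->first-index dict built once (objective: faster).

-- ===== PORT A =====
-- A's loop: for char in string: num += alphabet.index(char) * base ** (strlen - (idx+1)); idx += 1
-- alphabet.index(char) raises ValueError when char is absent: Pre_ excludes that; '.getD 0' is never reached under Pre_.
def prettyDecodeLoopA (alph : List Char) (base strlen : Int) : List Char → Int → Int → Int
  | [], _, num => num
  | c :: rest, idx, num =>
      prettyDecodeLoopA alph base strlen rest (idx + 1)
        (num + (((PySem.List.index? alph c).getD 0 : Nat) : Int) * base ^ (strlen - (idx + 1)).toNat)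

def pretty_decode (string : String) (alphabet : String) : Int :=
  prettyDecodeLoopA alphabet.toList (alphabet.toList.length : Int) (string.toList.length : Int)
    string.toList 0 0

-- ===== PORT B =====
-- pos = {}; for i, char in enumerate(alphabet): pos.setdefault(char, i)
def prettyDecodePos (alph : List Char) : PySem.Dict Char Int :=
  (PySem.List.enumerate alph).foldl (fun d p => d.setdefault p.2 p.1) PySem.Dict.empty

-- num = num * base + pos[char]   (pos[char] raises KeyError when absent — excluded by Pre_; '.getD 0' never reached)
def pretty_decode_alt (string : String) (alphabet : String) : Int :=
  string.toList.foldl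
    (fun num c => num * (alphabet.toList.length : Int) + (prettyDecodePos alphabet.toList).getD c 0) 0

-- ===== PRECONDITION & SPEC =====
-- Pre_: every character of the string occurs in the alphabet; otherwise A raises ValueError (B raises KeyError).
def Pre_pretty_decode (string : String) (alphabet : String) : Prop :=
  (string.toList.all (fun c => alphabet.toList.contains c)) = true
instance (string : String) (alphabet : String) : Decidable (Pre_pretty_decode string alphabet) := by
  unfold Pre_pretty_decode; infer_instance
def pvWitness_pretty_decode : String × String := ("ba", "ab")

def Spec_pretty_decode (string : String) (alphabet : String) (out : Int) : Prop := out = pretty_decode_alt string alphabet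
instance (string : String) (alphabet : String) (out : Int) : Decidable (Spec_pretty_decode string alphabet out) := by unfold Spec_pretty_decode; infer_instance

-- ===== CLAIM (what is proved, stated in full; the proofs are below) =====
def Claim_equal_pretty_decode : Prop := ∀ (string : String) (alphabet : String), Dom_pretty_decode string alphabet → Pre_pretty_decode string alphabet → Spec_pretty_decode string alphabet (pretty_decode string alphabet)

-- ===== LEMMAS AND PROOFS =====

-- setdefault is 'insert only when the key is new'
theorem setdefault_eq {κ ν : Type} [BEq κ] (d : PySem.Dict κ ν) (k : κ) (v : ν) :
    d.setdefault k v = if d.contains k then d else d.insert k v := by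
  simp [PySem.Dict.setdefault, PySem.Dict.insert]
  split_ifs with h <;> simp

theorem contains_setdefault {κ ν : Type} [BEq κ] [LawfulBEq κ] (d : PySem.Dict κ ν) (k c : κ) (v : ν) :
    (d.setdefault k v).contains c = (c == k || d.contains c) := by
  rw [setdefault_eq]
  split_ifs with h
  · by_cases hck : c = k
    · subst hck; simp [h]
    · simp [hck]
  · rw [PySem.Dict.contains_insert]

theorem getD_setdefault_of_contains {κ ν : Type} [BEq κ] [LawfulBEq κ]
    (d : PySem.Dict κ ν) (k c : κ) (v x : ν) (hc : d.contains c = true) :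
    (d.setdefault k v).getD c x = d.getD c x := by
  rw [setdefault_eq]
  split_ifs with h
  · rfl
  · by_cases hck : c = k
    · subst hck; exact absurd hc (by simp [h])
    · simp [PySem.Dict.getD_eq_get?_getD, PySem.Dict.get?_insert_of_ne d v hck]

-- the setdefault-fold never changes the value of a key already present
theorem foldl_setdefault_of_contains (l : List (Int × Char)) (d : PySem.Dict Char Int)
    (c : Char) (hc : d.contains c = true) :
    (l.foldl (fun d p => d.setdefault p.2 p.1) d).getD c 0 = d.getD c 0 := by
  induction l generalizing d with
  | nil => rfl
  | cons p rest ih =>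
      simp only [List.foldl_cons]
      rw [ih _ (by rw [contains_setdefault]; simp [hc]),
          getD_setdefault_of_contains _ _ _ _ _ hc]

-- the dict built by the setdefault loop holds the FIRST index of each member char
theorem foldl_setdefault_getD (l : List Char) (s : Int) (d : PySem.Dict Char Int)
    (c : Char) (hcl : c ∈ l) (hd : d.contains c = false) :
    ((PySem.List.enumerate l s).foldl (fun d p => d.setdefault p.2 p.1) d).getD c 0
      = s + (((PySem.List.index? l c).getD 0 : Nat) : Int) := by
  induction l generalizing s d with
  | nil => cases hcl
  | cons a rest ih =>
      rw [PySem.List.enumerate_cons]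
      simp only [List.foldl_cons]
      by_cases hac : a = c
      · subst hac
        have h1 : (d.setdefault a s).contains a = true := by
          rw [contains_setdefault]; simp
        have h2 : (d.setdefault a s).getD a 0 = s := by
          rw [setdefault_eq, hd]
          simp [PySem.Dict.getD_eq_get?_getD, PySem.Dict.get?_insert_self]
        rw [foldl_setdefault_of_contains _ _ _ h1, h2, PySem.List.index?_cons_self]
        simp
      · have hrest : c ∈ rest := by cases hcl with
          | head => exact absurd rfl hac
          | tail _ h => exact h
        have hd' : (d.setdefault a s).contains c = false := by
          rw [contains_setdefault, hd]
          simp [Ne.symm hac]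
        rw [ih (s + 1) _ hrest hd', PySem.List.index?_cons_of_ne _ hac]
        obtain ⟨k, hk⟩ := (PySem.List.index?_isSome_iff rest c).mpr hrest |> Option.isSome_iff_exists.mp
        rw [hk]
        simp
        omega

theorem pos_getD (alph : List Char) (c : Char) (hc : c ∈ alph) :
    (prettyDecodePos alph).getD c 0 = (((PySem.List.index? alph c).getD 0 : Nat) : Int) := by
  have := foldl_setdefault_getD alph 0 PySem.Dict.empty c hc (by simp [pysem])
  simpa [prettyDecodePos] using this

-- Horner fold: the accumulator factors out as num * base ^ length
theorem horner_shift (v : Char → Int) (base : Int) (l : List Char) :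
    ∀ num : Int, l.foldl (fun n c => n * base + v c) num
      = num * base ^ l.length + l.foldl (fun n c => n * base + v c) 0 := by
  induction l with
  | nil => intro num; simp
  | cons c rest ih =>
      intro num
      simp only [List.foldl_cons, List.length_cons]
      rw [ih (num * base + v c), ih (0 * base + v c)]
      ring

-- A's positional loop equals the Horner fold with the same per-char values
theorem loopA_eq (alph : List Char) (base strlen : Int) (l : List Char) :
    ∀ (idx num : Int), strlen = idx + l.length →
    prettyDecodeLoopA alph base strlen l idx num
      = num + l.foldl (fun n c => n * base + (((PySem.List.index? alph c).getD 0 : Nat) : Int)) 0 := by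
  induction l with
  | nil => intro idx num _; simp [prettyDecodeLoopA]
  | cons c rest ih =>
      intro idx num h
      simp only [List.length_cons] at h
      have hpow : (strlen - (idx + 1)).toNat = rest.length := by omega
      simp only [prettyDecodeLoopA, List.foldl_cons]
      rw [ih (idx + 1) _ (by omega), hpow,
          horner_shift _ base rest (0 * base + _)]
      ring

-- the Horner folds of the two ports agree char by char under Pre_
theorem folds_eq (string alphabet : String) (h : Pre_pretty_decode string alphabet) :
    pretty_decode_alt string alphabet
      = string.toList.foldl
          (fun n c => n * (alphabet.toList.length : Int)
            + (((PySem.List.index? alphabet.toList c).getD 0 : Nat) : Int)) 0 := by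
  unfold pretty_decode_alt
  apply PySem.List.foldl_congr_mem
  intro n c hc
  rw [pos_getD _ _ (by simpa using List.all_eq_true.mp h c hc)]

-- ===== VERDICT (by name: the statement is the Claim_ definition above) =====
theorem pretty_decode_spec : Claim_equal_pretty_decode := by
  intro string alphabet _ hpre
  unfold Spec_pretty_decode pretty_decode
  rw [loopA_eq _ _ _ _ 0 0 (by simp), folds_eq _ _ hpre]
  simp
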